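-- pv_equiv track=rewrite | github.com/amos1969/tough-topics | recursion/count-zero-problem5.py | zero_counter
-- ===== SOURCE A (Python) =====
-- def zero_counter(some_list):
--     """Takes a list of integers and returns the number of zeroes found
--     inside the list"""
--     # Base Case
--     if not some_list:
--         return 0
--     # Remove the last value from the list
--     current_value = some_list.pop()
--     if current_value == 0:
--         # Return 1 and the sum of the other zeroes
--         return 1 + zero_counter(some_list)
--     else:
--         # Return 0 and the sum of the other zeroes
--         return 0 + zero_counter(some_list)
-- ===== SOURCE B (Python) =====
-- def zero_counter(some_list):
--     """Takes a list of integers and returns the number of zeroes found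
--     inside the list"""
--     count = 0
--     while some_list:
--         if some_list.pop() == 0:
--             count += 1
--     return count
-- ===== Notes on version B (the rewrite author's own statement) =====
-- stated objective: simpler
-- what changed: Replaced the non-tail recursion (pop last, recurse, add result) by an iterative while-pop loop with an explicit counter accumulator; B still empties the list in place like A.
import Mathlib
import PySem

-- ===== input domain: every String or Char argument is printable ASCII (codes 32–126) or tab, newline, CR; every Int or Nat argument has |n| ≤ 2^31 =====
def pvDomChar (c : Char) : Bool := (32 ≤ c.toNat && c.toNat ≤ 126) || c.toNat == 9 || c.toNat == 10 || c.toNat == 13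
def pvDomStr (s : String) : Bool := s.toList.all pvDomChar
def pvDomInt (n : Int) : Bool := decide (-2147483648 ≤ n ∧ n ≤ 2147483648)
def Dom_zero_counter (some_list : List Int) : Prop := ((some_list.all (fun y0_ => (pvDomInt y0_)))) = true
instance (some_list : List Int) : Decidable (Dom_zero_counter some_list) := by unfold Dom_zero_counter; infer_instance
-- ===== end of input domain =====

-- B replaces A's non-tail recursion by an iterative while-pop loop with a counter
-- accumulator; both empty the input list in place in Python (return values proved equal here).

-- ===== PORT A =====
-- A: if list empty return 0; else pop last, recurse on the rest, add 1 if popped value is 0.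
def zero_counter : List Int → Int
  | [] => 0
  | a :: l =>
    let current_value := (a :: l).getLast (by simp)
    if current_value = 0 then 1 + zero_counter (a :: l).dropLast
    else 0 + zero_counter (a :: l).dropLast
termination_by some_list => some_list.length
decreasing_by all_goals simp [List.length_dropLast]

-- ===== PORT B =====
-- B: while-loop popping the last element, incrementing an explicit counter.
def zero_counter_loop : List Int → Int → Int
  | [], count => count
  | a :: l, count =>
    zero_counter_loop (a :: l).dropLast
      (if (a :: l).getLast (by simp) = 0 then count + 1 else count)
termination_by some_list _ => some_list.length
decreasing_by simp [List.length_dropLast]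

def zero_counter_alt (some_list : List Int) : Int :=
  zero_counter_loop some_list 0

-- ===== PRECONDITION & SPEC =====
def Spec_zero_counter (some_list : List Int) (out : Int) : Prop := out = zero_counter_alt some_list
instance (some_list : List Int) (out : Int) : Decidable (Spec_zero_counter some_list out) := by unfold Spec_zero_counter; infer_instance

-- ===== CLAIM (what is proved, stated in full; the proofs are below) =====
def Claim_equal_zero_counter : Prop := ∀ (some_list : List Int), Dom_zero_counter some_list → Spec_zero_counter some_list (zero_counter some_list)

-- ===== LEMMAS AND PROOFS =====
theorem zero_counter_loop_acc (some_list : List Int) (count : Int) :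
    zero_counter_loop some_list count = count + zero_counter some_list := by
  induction hn : some_list.length generalizing some_list count with
  | zero =>
    have : some_list = [] := List.eq_nil_of_length_eq_zero hn
    subst this
    rw [zero_counter_loop, zero_counter]; ring
  | succ n ih =>
    match some_list with
    | [] => simp at hn
    | a :: l =>
      rw [zero_counter_loop, zero_counter]
      have hlen : (a :: l).dropLast.length = n := by
        simp [List.length_dropLast] at hn ⊢; omega
      rw [ih _ _ hlen]
      split_ifs <;> ring

-- ===== VERDICT (by name: the statement is the Claim_ definition above) =====
theorem zero_counter_spec : Claim_equal_zero_counter := by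
  intro some_list _
  unfold Spec_zero_counter zero_counter_alt
  rw [zero_counter_loop_acc]
  ring
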